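-- pv_equiv track=rewrite | github.com/1Gughan1/AI-files-sorting | ai_search.py | identify_disease
-- ===== SOURCE A (Python) =====
-- def kmp_search(text, pattern):
--     def build_kmp_table(pattern):
--         m = len(pattern)
--         kmp_table = [0] * m
--         j = 0
--
--
--         for i in range(1, m):
--             while j > 0 and pattern[i] != pattern[j]:
--                 j = kmp_table[j - 1]
--             if pattern[i] == pattern[j]:
--                 j += 1
--             kmp_table[i] = j
--
--         return kmp_table
--
--     m = len(pattern)
--     n = len(text)
--     kmp_table = build_kmp_table(pattern)
--
--     i = j = 0
--     while i < n:
--         if pattern[j] == text[i]: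
--             i += 1
--             j += 1
--             if j == m:
--                 return True
--         else:
--             if j != 0:
--                 j = kmp_table[j - 1]
--             else:
--                 i += 1
--
--     return False
--
-- def identify_disease(text):
--     diseases_keywords = {
--         "cancer": ["cancer", "tumor", "oncology", "malignant", "carcinoma"],
--         "fever": ["fever", "flu", "infection", "high temperature", "viral"],
--         "diabetes": ["diabetes", "insulin", "blood sugar", "hyperglycemia", "type 2"],
--         "asthma": ["asthma", "bronchitis", "respiratory", "wheezing", "breathing difficulty"],
--         "hypertension": ["hypertension", "high blood pressure", "BP", "hypertensive", "heart disease"],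
--         "arthritis": ["arthritis", "joint pain", "rheumatism", "osteoarthritis", "inflammatory arthritis"],
--         "allergy": ["allergy", "hay fever", "allergic", "allergen", "hypersensitivity"],
--         "headache": ["headache", "migraine", "cephalgia", "tension headache", "cluster headache"],
--         "depression": ["depression", "mental health", "sadness", "psychological", "mood disorder"],
--     }
--
--     for disease, keywords in diseases_keywords.items():
--         for keyword in keywords:
--             if kmp_search(text.lower(), keyword.lower()):
--                 return disease
--
--     return None
-- ===== SOURCE B (Python) =====
-- DISEASES_KEYWORDS = {
--     "cancer": ["cancer", "tumor", "oncology", "malignant", "carcinoma"],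
--     "fever": ["fever", "flu", "infection", "high temperature", "viral"],
--     "diabetes": ["diabetes", "insulin", "blood sugar", "hyperglycemia", "type 2"],
--     "asthma": ["asthma", "bronchitis", "respiratory", "wheezing", "breathing difficulty"],
--     "hypertension": ["hypertension", "high blood pressure", "BP", "hypertensive", "heart disease"],
--     "arthritis": ["arthritis", "joint pain", "rheumatism", "osteoarthritis", "inflammatory arthritis"],
--     "allergy": ["allergy", "hay fever", "allergic", "allergen", "hypersensitivity"],
--     "headache": ["headache", "migraine", "cephalgia", "tension headache", "cluster headache"],
--     "depression": ["depression", "mental health", "sadness", "psychological", "mood disorder"],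
-- }
--
--
-- def identify_disease(text):
--     # Inverted, indexed, two-stage algorithm: build a hash index from first
--     # character to the (disease, keyword) pairs starting with it, then one pass
--     # over the text positions collects the set of diseases whose keyword starts
--     # there (only the bucket of the current character is probed), and a final
--     # pass returns the first matched disease in dict order.
--     t = text.lower()
--     index = {}
--     for disease, keywords in DISEASES_KEYWORDS.items():
--         for kw in keywords:
--             kw = kw.lower()
--             index[kw[0]] = index.get(kw[0], []) + [(disease, kw)]
--     matched = set()
--     for i, c in enumerate(t):
--         for disease, kw in index.get(c, []):
--             if t.startswith(kw, i):
--                 matched.add(disease)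
--     for disease in DISEASES_KEYWORDS:
--         if disease in matched:
--             return disease
--     return None
-- ===== Notes on version B (the rewrite author's own statement) =====
-- stated objective: faster
-- what changed: Inverts and indexes the search: instead of A's per-keyword KMP scans with early return, B builds a hash index from first character to (disease, keyword) pairs, makes one pass over the text positions probing only the bucket of the current character and collecting matched diseases into a set, then a final pass returns the first matched disease in dict order.
import Mathlib
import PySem

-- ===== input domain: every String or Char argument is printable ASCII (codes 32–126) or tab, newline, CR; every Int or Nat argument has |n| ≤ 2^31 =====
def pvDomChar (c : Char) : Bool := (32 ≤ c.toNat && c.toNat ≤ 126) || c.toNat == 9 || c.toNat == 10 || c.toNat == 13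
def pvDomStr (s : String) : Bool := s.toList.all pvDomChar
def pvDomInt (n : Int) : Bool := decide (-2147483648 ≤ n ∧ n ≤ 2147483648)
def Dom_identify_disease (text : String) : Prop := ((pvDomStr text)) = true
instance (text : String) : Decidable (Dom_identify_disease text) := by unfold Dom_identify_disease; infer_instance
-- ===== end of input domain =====

-- B inverts and indexes the search (objective: faster, measured): a hash index from first character
-- to (disease, keyword) pairs, one pass over the text positions probing only the current character's
-- bucket and collecting matched diseases into a set, then a pass returning the first in dict order.

-- ===== PORT A =====

-- shared keyword table (the dict literal of the Python source, insertion order)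
def pvDiseases : List (String × List String) :=
  [ ("cancer", ["cancer", "tumor", "oncology", "malignant", "carcinoma"]),
    ("fever", ["fever", "flu", "infection", "high temperature", "viral"]),
    ("diabetes", ["diabetes", "insulin", "blood sugar", "hyperglycemia", "type 2"]),
    ("asthma", ["asthma", "bronchitis", "respiratory", "wheezing", "breathing difficulty"]),
    ("hypertension", ["hypertension", "high blood pressure", "BP", "hypertensive", "heart disease"]),
    ("arthritis", ["arthritis", "joint pain", "rheumatism", "osteoarthritis", "inflammatory arthritis"]),
    ("allergy", ["allergy", "hay fever", "allergic", "allergen", "hypersensitivity"]),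
    ("headache", ["headache", "migraine", "cephalgia", "tension headache", "cluster headache"]),
    ("depression", ["depression", "mental health", "sadness", "psychological", "mood disorder"]) ]

-- inner `while j > 0 and pattern[i] != pattern[j]` of build_kmp_table; fuel j suffices (j strictly decreases)
def kmpBuildInner (p : List Char) (tbl : List Nat) (i : Nat) : Nat → Nat → Nat
  | 0, j => j
  | f + 1, j =>
      if 0 < j ∧ PySem.List.pyGet? p (i : Int) ≠ PySem.List.pyGet? p (j : Int) then
        kmpBuildInner p tbl i f (tbl.getD (j - 1) 0)
      else j

-- build_kmp_table: kmp_table = [0]*m; for i in range(1, m): …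
def kmpBuildTable (p : List Char) : List Nat :=
  let m := p.length
  (List.range' 1 (m - 1)).foldl
    (fun (st : List Nat × Nat) i =>
      let j1 := kmpBuildInner p st.1 i st.2 st.2
      let j2 := if PySem.List.pyGet? p (i : Int) = PySem.List.pyGet? p (j1 : Int) then j1 + 1 else j1
      (st.1.set i j2, j2))
    (List.replicate m 0, 0) |>.1

-- main `while i < n` loop of kmp_search; i < n becomes "remaining text r nonempty"; fuel 2n+1 suffices
def kmpLoop (p : List Char) (tbl : List Nat) (m : Nat) : Nat → List Char → Nat → Bool
  | 0, _, _ => false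
  | f + 1, r, j =>
      match r with
      | [] => false
      | c :: r' =>
          if PySem.List.pyGet? p (j : Int) = some c then
            (if j + 1 = m then true else kmpLoop p tbl m f r' (j + 1))
          else if j ≠ 0 then kmpLoop p tbl m f (c :: r') (tbl.getD (j - 1) 0)
          else kmpLoop p tbl m f r' j

def kmp_search (text pattern : String) : Bool :=
  let p := pattern.toList
  let t := text.toList
  let tbl := kmpBuildTable p
  kmpLoop p tbl p.length (2 * t.length + 1) t 0

-- for keyword in keywords: if kmp_search(text.lower(), keyword.lower()): return disease
def idKwA (text : String) : List String → Bool
  | [] => false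
  | kw :: ks =>
      if kmp_search (PySem.Str.lower text) (PySem.Str.lower kw) then true else idKwA text ks

def idLoopA (text : String) : List (String × List String) → Option String
  | [] => none
  | (d, kws) :: rest => if idKwA text kws then some d else idLoopA text rest

def identify_disease (text : String) : Option String :=
  idLoopA text pvDiseases

-- ===== PORT B =====

-- index building: for each disease/keyword, kw = kw.lower(); index[kw[0]] = index.get(kw[0], []) + [(disease, kw)]
-- kw[0]: every keyword in the literal table is nonempty, so the [] branch (Python: IndexError) is unreachable
def bIndex : PySem.Dict Char (List (String × String)) :=
  pvDiseases.foldl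
    (fun d pr =>
      pr.2.foldl
        (fun d kw =>
          match (PySem.Str.lower kw).toList with
          | [] => d
          | c :: _ => d.insert c (d.getD c [] ++ [(pr.1, PySem.Str.lower kw)]))
        d)
    PySem.Dict.empty

-- pass 1: for i, c in enumerate(t): for disease, kw in index.get(c, []): if t.startswith(kw, i): matched.add(disease)
-- t.startswith(kw, i) for 0 ≤ i (enumerate indices) is "kw is a prefix of t[i:]", ported via Chars.startswith on drop
def bCollect (t : List Char) : PySem.Set String :=
  (PySem.List.enumerate t).foldl
    (fun s p =>
      (bIndex.getD p.2 []).foldl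
        (fun s e =>
          if PySem.Chars.startswith (t.drop p.1.toNat) e.2.toList then PySem.Set.add s e.1 else s)
        s)
    PySem.Set.empty

-- pass 2: for disease in …: if disease in matched: return disease
def bPick (m : PySem.Set String) : List (String × List String) → Option String
  | [] => none
  | pr :: rest => if PySem.Set.contains m pr.1 then some pr.1 else bPick m rest

def identify_disease_alt (text : String) : Option String :=
  let t := (PySem.Str.lower text).toList
  bPick (bCollect t) pvDiseases

-- ===== PRECONDITION & SPEC =====
def Spec_identify_disease (text : String) (out : Option String) : Prop := out = identify_disease_alt text
instance (text : String) (out : Option String) : Decidable (Spec_identify_disease text out) := by unfold Spec_identify_disease; infer_instance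

-- ===== CLAIM (what is proved, stated in full; the proofs are below) =====
def Claim_equal_identify_disease : Prop := ∀ (text : String), Dom_identify_disease text → Spec_identify_disease text (identify_disease text)

-- ===== LEMMAS AND PROOFS =====

-- first disease (in order) one of whose lowered keywords is a substring of the lowered text:
-- the common reference point both ports are reduced to
def idLoopRef (t : String) : List (String × List String) → Option String
  | [] => none
  | (d, kws) :: rest =>
      if kws.any (fun kw => PySem.Str.isIn (PySem.Str.lower kw) t) then some d else idLoopRef t rest

-- ---------- A-side: KMP search = substring test ----------

-- the prefix-table property the correctness proof needs: tbl[j-1] is a border of p.take j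
-- (a proper suffix that is also a prefix of p) and no longer border exists
def GoodTable (p : List Char) (tbl : List Nat) : Prop :=
  ∀ j, j < p.length → 0 < j →
    tbl.getD (j - 1) 0 < j ∧ (p.take (tbl.getD (j - 1) 0)) <:+ (p.take j) ∧
      ∀ l, l < j → tbl.getD (j - 1) 0 < l → ¬ (p.take l <:+ p.take j)

-- executable check of GoodTable (suffix tested as equality with a drop), for fast `decide`
def goodTableB (p : List Char) (tbl : List Nat) : Bool :=
  (List.range p.length).all fun j =>
    j == 0 ||
      (decide (tbl.getD (j - 1) 0 < j) &&
        (p.take (tbl.getD (j - 1) 0) == (p.take j).drop (j - tbl.getD (j - 1) 0)) &&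
        (List.range j).all fun l =>
          decide (l ≤ tbl.getD (j - 1) 0) || !(p.take l == (p.take j).drop (j - l)))

lemma take_suffix_take_iff (p : List Char) (l j : Nat) (hl : l ≤ j) (hj : j ≤ p.length) :
    p.take l <:+ p.take j ↔ p.take l = (p.take j).drop (j - l) := by
  rw [List.suffix_iff_eq_drop, List.length_take, List.length_take]
  have h1 : min l p.length = l := by omega
  have h2 : min j p.length = j := by omega
  rw [h1, h2]

lemma goodTableB_sound (p : List Char) (tbl : List Nat) (h : goodTableB p tbl = true) :
    GoodTable p tbl := by
  intro j hj hjpos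
  have h1 := List.all_eq_true.mp h j (List.mem_range.mpr hj)
  rw [Bool.or_eq_true, beq_iff_eq] at h1
  rcases h1 with h1 | h1
  · omega
  · rw [Bool.and_eq_true, Bool.and_eq_true, decide_eq_true_iff, beq_iff_eq] at h1
    obtain ⟨⟨hlt, heq⟩, hrest⟩ := h1
    refine ⟨hlt, ?_, ?_⟩
    · rw [take_suffix_take_iff p _ j (by omega) (by omega)]
      exact heq
    · intro l hl1 hl2 hsuf
      have h2 := List.all_eq_true.mp hrest l (List.mem_range.mpr hl1)
      rw [Bool.or_eq_true, decide_eq_true_iff, Bool.not_eq_eq_eq_not, Bool.not_true,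
        beq_eq_false_iff_ne] at h2
      rcases h2 with h2 | h2
      · omega
      · exact h2 ((take_suffix_take_iff p l j (by omega) (by omega)).mp hsuf)

-- KMP shift: replacing the matched prefix x by a border y preserves occurrence,
-- provided no longer border exists and the next pattern char is not c
lemma shift_iff (p x y : List Char) (c : Char) (s : List Char)
    (hxlen : x.length < p.length) (hyx : y <:+ x)
    (hnc : ¬ ((x ++ [c]) <+: p))
    (hbord : ∀ l, l < x.length → y.length < l → ¬ (p.take l <:+ x)) :
    (p <:+: x ++ c :: s ↔ p <:+: y ++ c :: s) := by
  obtain ⟨w, hw⟩ := hyx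
  constructor
  · rintro ⟨s₁, s₂, hsplit⟩
    by_cases hk : x.length ≤ s₁.length + y.length
    · have hwlen : w.length + y.length = x.length := by rw [← hw]; simp
      have hwle : w.length ≤ s₁.length := by omega
      have h1 : (s₁ ++ p ++ s₂).drop w.length = s₁.drop w.length ++ p ++ s₂ := by
        rw [List.append_assoc, List.drop_append, List.drop_append]
        have h0 : w.length - s₁.length = 0 := by omega
        rw [h0]
        simp [List.append_assoc]
      have h2 : (x ++ c :: s).drop w.length = y ++ c :: s := by
        rw [← hw, List.append_assoc, List.drop_append]
        simp
      exact ⟨s₁.drop w.length, s₂, by rw [← h1, hsplit, h2]⟩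
    · exfalso
      have hkx : s₁.length < x.length := by omega
      have hlp : x.length - s₁.length ≤ p.length := by omega
      have hx : x = s₁ ++ p.take (x.length - s₁.length) := by
        have h := congrArg (List.take x.length) hsplit
        rw [List.append_assoc, List.take_append, List.take_append,
            List.take_of_length_le (Nat.le_of_lt hkx),
            List.take_left] at h
        have h0 : x.length - s₁.length - p.length = 0 := by omega
        rw [h0] at h
        simpa using h.symm
      have htl : p.take (x.length - s₁.length) <:+ x := ⟨s₁, hx.symm⟩
      by_cases hl : x.length - s₁.length = x.length
      · have hs₁ : s₁ = [] := by
          have : s₁.length = 0 := by omega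
          exact List.length_eq_zero_iff.mp this
        subst hs₁
        simp only [List.nil_append] at hsplit hx
        have hdl : p.take (x.length) ++ p.drop (x.length) = p := List.take_append_drop _ _
        rw [hl] at hx
        cases hdrop : p.drop x.length with
        | nil =>
            have := congrArg List.length hdrop
            simp at this
            omega
        | cons a u =>
            have hps : x ++ (a :: u) = p := by rw [hx, ← hdrop]; exact hdl
            have hcs : (x ++ a :: u) ++ s₂ = x ++ c :: s := by rw [hps]; exact hsplit
            rw [List.append_assoc] at hcs
            have := List.append_cancel_left hcs
            have hac : a = c := by injection this
            exact hnc ⟨u, by rw [← hps, hac]; simp⟩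
      · exact hbord _ (by omega) (by omega) htl
  · rintro h
    have hsuf : y ++ c :: s <:+ x ++ c :: s := ⟨w, by rw [← List.append_assoc, hw]⟩
    exact h.trans hsuf.isInfix

lemma kmpLoop_iff (p : List Char) (tbl : List Nat) (hg : GoodTable p tbl) (hp : p ≠ []) :
    ∀ fuel r j, j < p.length → 2 * r.length + j + 1 ≤ fuel →
      (kmpLoop p tbl p.length fuel r j = true ↔ p <:+: (p.take j ++ r)) := by
  intro fuel
  induction fuel with
  | zero => intro r j hj hf; omega
  | succ f IH =>
      intro r j hj hf
      cases r with
      | nil =>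
          simp only [kmpLoop]
          constructor
          · intro h; cases h
          · intro h
            have hlen := h.length_le
            simp [List.length_take] at hlen
            omega
      | cons c r' =>
          have hgj : PySem.List.pyGet? p ((j : Nat) : Int) = some p[j] := by
            rw [PySem.List.pyGet?_natCast]
            exact List.getElem?_eq_getElem hj
          simp only [List.length_cons] at hf
          by_cases hc : p[j] = c
          · have hcond : PySem.List.pyGet? p ((j : Nat) : Int) = some c := by rw [hgj, hc]
            rw [kmpLoop, if_pos hcond]
            by_cases hm : j + 1 = p.length
            · rw [if_pos hm]
              have hpeq : p = p.take j ++ [c] := by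
                conv_lhs => rw [← List.take_length (l := p), ← hm,
                  List.take_succ_eq_append_getElem hj, hc]
              constructor
              · intro _
                refine ⟨[], r', ?_⟩
                conv_lhs => rw [List.nil_append, hpeq]
                simp
              · intro _; rfl
            · have hj1 : j + 1 < p.length := by omega
              rw [if_neg hm, IH r' (j + 1) hj1 (by omega)]
              rw [List.take_succ_eq_append_getElem hj, hc]
              simp [List.append_assoc]
          · have hcond : ¬ (PySem.List.pyGet? p ((j : Nat) : Int) = some c) := by
              rw [hgj]; simp [hc]
            rw [kmpLoop, if_neg hcond]
            by_cases hz : j = 0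
            · subst hz
              rw [if_neg (by simp), IH r' 0 hj (by omega)]
              simp only [List.take_zero, List.nil_append]
              rw [List.infix_cons_iff]
              constructor
              · intro h; exact Or.inr h
              · rintro (hpre | hinf)
                · exfalso
                  cases p with
                  | nil => exact hp rfl
                  | cons a u =>
                      have hac : a = c := by
                        obtain ⟨v, hv⟩ := hpre
                        injection hv
                      simp [hac] at hc
                · exact hinf
            · obtain ⟨hlt, hbrd, hmax⟩ := hg j hj (Nat.pos_of_ne_zero hz)
              rw [if_pos hz, IH (c :: r') (tbl.getD (j - 1) 0) (by omega)
                (by simp only [List.length_cons]; omega)]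
              have hxlen : (p.take j).length = j := by
                rw [List.length_take]; omega
              have hylen : (p.take (tbl.getD (j - 1) 0)).length = tbl.getD (j - 1) 0 := by
                rw [List.length_take]; omega
              refine (shift_iff p (p.take j) (p.take (tbl.getD (j - 1) 0)) c r'
                (by omega) hbrd ?_ ?_).symm
              · intro hpre
                rw [List.prefix_iff_eq_take] at hpre
                rw [List.length_append, hxlen] at hpre
                simp only [List.length_cons, List.length_nil] at hpre
                rw [List.take_succ_eq_append_getElem hj] at hpre
                have := List.append_cancel_left ((List.append_cancel_left_eq _ _ _).mpr rfl ▸ hpre)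
                have hcc : c = p[j] := by
                  have h2 := List.append_cancel_left hpre
                  injection h2
                exact hc hcc.symm
              · intro l hl1 hl2 hsuf
                rw [hxlen] at hl1
                rw [hylen] at hl2
                exact hmax l hl1 hl2 hsuf

lemma kmp_search_eq (t pat : String) (hne : pat.toList ≠ [])
    (hg : GoodTable pat.toList (kmpBuildTable pat.toList)) :
    kmp_search t pat = PySem.Str.isIn pat t := by
  have h0 : 0 < pat.toList.length := List.length_pos_iff.mpr hne
  rw [Bool.eq_iff_iff, PySem.Str.isIn_iff_infix]
  unfold kmp_search
  rw [kmpLoop_iff pat.toList _ hg hne (2 * t.toList.length + 1) t.toList 0 h0 (by omega)]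
  simp

lemma idKwA_eq (text : String) (kws : List String)
    (h : ∀ kw ∈ kws, kmp_search (PySem.Str.lower text) (PySem.Str.lower kw)
           = PySem.Str.isIn (PySem.Str.lower kw) (PySem.Str.lower text)) :
    idKwA text kws
      = kws.any (fun kw => PySem.Str.isIn (PySem.Str.lower kw) (PySem.Str.lower text)) := by
  induction kws with
  | nil => rfl
  | cons kw ks IH =>
      rw [List.any_cons]
      simp only [idKwA]
      rw [h kw (List.mem_cons_self ..)]
      cases hi : PySem.Str.isIn (PySem.Str.lower kw) (PySem.Str.lower text) with
      | true => simp
      | false => simp [IH (fun k hk => h k (List.mem_cons_of_mem _ hk))]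

lemma loopsA_eq (text : String) (l : List (String × List String))
    (h : ∀ pr ∈ l, ∀ kw ∈ pr.2,
        kmp_search (PySem.Str.lower text) (PySem.Str.lower kw)
          = PySem.Str.isIn (PySem.Str.lower kw) (PySem.Str.lower text)) :
    idLoopA text l = idLoopRef (PySem.Str.lower text) l := by
  induction l with
  | nil => rfl
  | cons pr rest IH =>
      obtain ⟨d, kws⟩ := pr
      simp only [idLoopA, idLoopRef]
      rw [idKwA_eq text kws (fun kw hk => h _ (List.mem_cons_self ..) kw hk),
          IH (fun q hq kw hk => h q (List.mem_cons_of_mem _ hq) kw hk)]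

lemma idLoopA_eq_ref (text : String) :
    idLoopA text pvDiseases = idLoopRef (PySem.Str.lower text) pvDiseases := by
  have hall : ∀ pr ∈ pvDiseases, ∀ kw ∈ pr.2,
      (PySem.Str.lower kw).toList ≠ [] ∧
        GoodTable (PySem.Str.lower kw).toList (kmpBuildTable (PySem.Str.lower kw).toList) := by
    have hb : ∀ pr ∈ pvDiseases, ∀ kw ∈ pr.2,
        (PySem.Str.lower kw).toList ≠ [] ∧
          goodTableB (PySem.Str.lower kw).toList (kmpBuildTable (PySem.Str.lower kw).toList)
            = true := by decide
    exact fun pr hpr kw hk =>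
      ⟨(hb pr hpr kw hk).1, goodTableB_sound _ _ (hb pr hpr kw hk).2⟩
  exact loopsA_eq text pvDiseases
    (fun pr hpr kw hk => kmp_search_eq _ _ (hall pr hpr kw hk).1 (hall pr hpr kw hk).2)

-- ---------- B-side: the collected set contains exactly the matched diseases ----------

-- the (disease, lowered keyword) pairs in table order
def pvFlat : List (String × String) :=
  pvDiseases.flatMap (fun pr => pr.2.map (fun kw => (pr.1, PySem.Str.lower kw)))

-- the index bucket of c holds exactly the pairs whose keyword starts with c (inner keyword loop)
lemma getD_bIndexKw (ds : String) (kws : List String)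
    (d : PySem.Dict Char (List (String × String))) (c : Char) :
    (kws.foldl
        (fun d kw =>
          match (PySem.Str.lower kw).toList with
          | [] => d
          | ch :: _ => d.insert ch (d.getD ch [] ++ [(ds, PySem.Str.lower kw)]))
        d).getD c []
      = d.getD c []
        ++ (kws.map (fun kw => (ds, PySem.Str.lower kw))).filter
             (fun e => e.2.toList.head? == some c) := by
  induction kws generalizing d with
  | nil => simp
  | cons kw rest IH =>
      simp only [List.foldl_cons, List.map_cons, List.filter_cons]
      cases h : (PySem.Str.lower kw).toList with
      | nil =>
          rw [IH]
          simp
      | cons ch tl =>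
          rw [IH, PySem.Dict.getD_insert]
          by_cases hc : c = ch
          · subst hc
            simp [List.append_assoc]
          · rw [if_neg hc]
            simp [Ne.symm hc]

lemma getD_bIndex (c : Char) :
    bIndex.getD c [] = pvFlat.filter (fun e => e.2.toList.head? == some c) := by
  unfold bIndex pvFlat
  have gen : ∀ (prs : List (String × List String)) (d : PySem.Dict Char (List (String × String))),
      (prs.foldl
          (fun d pr =>
            pr.2.foldl
              (fun d kw =>
                match (PySem.Str.lower kw).toList with
                | [] => d
                | c :: _ => d.insert c (d.getD c [] ++ [(pr.1, PySem.Str.lower kw)]))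
              d)
          d).getD c []
        = d.getD c []
          ++ (prs.flatMap (fun pr => pr.2.map (fun kw => (pr.1, PySem.Str.lower kw)))).filter
               (fun e => e.2.toList.head? == some c) := by
    intro prs
    induction prs with
    | nil => simp
    | cons pr rest IH =>
        intro d
        simp only [List.foldl_cons, List.flatMap_cons, List.filter_append]
        rw [IH, getD_bIndexKw, List.append_assoc]
  rw [gen]
  simp [PySem.Dict.getD_empty]

lemma mem_foldl_addIf {α : Type} (l : List α) (c : α → Bool) (f : α → String)
    (s : PySem.Set String) (x : String) :
    (x ∈ l.foldl (fun s a => if c a then PySem.Set.add s (f a) else s) s) ↔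
      x ∈ s ∨ ∃ a ∈ l, c a = true ∧ x = f a := by
  induction l generalizing s with
  | nil => simp
  | cons a rest IH =>
      simp only [List.foldl_cons]
      rw [IH]
      by_cases hc : c a = true
      · rw [if_pos hc, PySem.Set.mem_add]
        simp only [List.mem_cons]
        constructor
        · rintro (hm | ⟨q, hq, hcq, hxq⟩)
          · rcases hm with hm | hm
            · exact Or.inl hm
            · exact Or.inr ⟨a, Or.inl rfl, hc, hm⟩
          · exact Or.inr ⟨q, Or.inr hq, hcq, hxq⟩
        · rintro (hm | ⟨q, hq, hcq, hxq⟩)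
          · exact Or.inl (Or.inl hm)
          · rcases hq with hq | hq
            · subst hq; exact Or.inl (Or.inr hxq)
            · exact Or.inr ⟨q, hq, hcq, hxq⟩
      · rw [if_neg hc]
        simp only [List.mem_cons]
        constructor
        · rintro (hm | ⟨q, hq, hcq, hxq⟩)
          · exact Or.inl hm
          · exact Or.inr ⟨q, Or.inr hq, hcq, hxq⟩
        · rintro (hm | ⟨q, hq, hcq, hxq⟩)
          · exact Or.inl hm
          · rcases hq with hq | hq
            · subst hq; exact absurd hcq hc
            · exact Or.inr ⟨q, hq, hcq, hxq⟩

lemma mem_bCollect_aux (t : List Char) (L : List (Int × Char)) (s : PySem.Set String) (x : String) :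
    (x ∈ L.foldl
        (fun s p =>
          (bIndex.getD p.2 []).foldl
            (fun s e =>
              if PySem.Chars.startswith (t.drop p.1.toNat) e.2.toList then PySem.Set.add s e.1
              else s)
            s)
        s) ↔
      x ∈ s ∨ ∃ p ∈ L, ∃ e ∈ bIndex.getD p.2 [],
        PySem.Chars.startswith (t.drop p.1.toNat) e.2.toList = true ∧ x = e.1 := by
  induction L generalizing s with
  | nil => simp
  | cons p rest IH =>
      simp only [List.foldl_cons]
      rw [IH, mem_foldl_addIf]
      simp only [List.mem_cons]
      constructor
      · rintro ((hm | hm) | ⟨q, hq, hrest⟩)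
        · exact Or.inl hm
        · exact Or.inr ⟨p, Or.inl rfl, hm⟩
        · exact Or.inr ⟨q, Or.inr hq, hrest⟩
      · rintro (hm | ⟨q, hq, hrest⟩)
        · exact Or.inl (Or.inl hm)
        · rcases hq with hq | hq
          · subst hq; exact Or.inl (Or.inr hrest)
          · exact Or.inr ⟨q, hq, hrest⟩

-- a nonempty prefix of t.drop k starts with t[k]
lemma head?_of_prefix_drop (t kl : List Char) (k : Nat) (hk : k < t.length) (hne : kl ≠ [])
    (h : kl <+: t.drop k) : kl.head? = some t[k] := by
  obtain ⟨sfx, hs⟩ := h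
  cases kl with
  | nil => exact absurd rfl hne
  | cons a u =>
      have hh : (t.drop k).head? = some a := by rw [← hs]; rfl
      rw [List.head?_drop] at hh
      rw [List.getElem?_eq_getElem hk] at hh
      simpa using hh.symm

-- membership collected in pass 1 ⇔ some keyword of the disease starts at some position
set_option maxHeartbeats 1600000 in
lemma mem_bCollect (t : List Char) (x : String) :
    (x ∈ bCollect t) ↔
      ∃ pr ∈ pvDiseases, x = pr.1 ∧ ∃ kw ∈ pr.2, ∃ k < t.length,
        PySem.Chars.startswith (t.drop k) (PySem.Str.lower kw).toList = true := by
  have hne0 : ∀ q ∈ pvDiseases, ∀ kw ∈ q.2, (PySem.Str.lower kw).toList ≠ [] := by decide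
  have hne : ∀ e ∈ pvFlat, e.2.toList ≠ [] := by
    intro e he
    simp only [pvFlat, List.mem_flatMap, List.mem_map] at he
    obtain ⟨pr, hpr, kw, hkw, hekw⟩ := he
    rw [← hekw]
    exact hne0 pr hpr kw hkw
  unfold bCollect
  rw [mem_bCollect_aux]
  simp only [PySem.Set.empty, List.not_mem_nil, false_or]
  constructor
  · rintro ⟨p, hp, e, he, hsw, hx⟩
    obtain ⟨k, hk, hpk⟩ := (PySem.List.mem_enumerate_iff _ _ _).mp hp
    subst hpk
    have htn : ((0 : Int) + (k : Int)).toNat = k := by omega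
    rw [htn] at hsw
    rw [getD_bIndex, List.mem_filter] at he
    have hef : e ∈ pvFlat := he.1
    simp only [pvFlat, List.mem_flatMap, List.mem_map] at hef
    obtain ⟨pr, hpr, kw, hkw, hekw⟩ := hef
    refine ⟨pr, hpr, ?_, kw, hkw, k, hk, ?_⟩
    · rw [hx, ← hekw]
    · rw [← hekw] at hsw; exact hsw
  · rintro ⟨pr, hpr, hx, kw, hkw, k, hk, hsw⟩
    have hmem : ((pr.1, PySem.Str.lower kw) : String × String) ∈ pvFlat := by
      simp only [pvFlat, List.mem_flatMap, List.mem_map]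
      exact ⟨pr, hpr, kw, hkw, rfl⟩
    have hkne : (PySem.Str.lower kw).toList ≠ [] := hne _ hmem
    have hhead : (PySem.Str.lower kw).toList.head? = some t[k] :=
      head?_of_prefix_drop t _ k hk hkne ((PySem.Chars.startswith_iff _ _).mp hsw)
    refine ⟨((k : Int), t[k]), ?_, (pr.1, PySem.Str.lower kw), ?_, ?_, hx⟩
    · exact (PySem.List.mem_enumerate_iff _ _ _).mpr ⟨k, hk, by simp⟩
    · rw [getD_bIndex, List.mem_filter]
      refine ⟨hmem, ?_⟩
      rw [PySem.Str.toList_lower] at hhead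
      simp [hhead]
    · have htn : ((k : Int)).toNat = k := by omega
      rw [htn]; exact hsw

-- one keyword: "starts at some position" = "is a substring" (keyword nonempty)
lemma exists_startswith_iff_isIn (t kw : List Char) (hk : kw ≠ []) :
    (∃ i < t.length, PySem.Chars.startswith (t.drop i) kw = true) ↔
      PySem.Chars.isIn kw t = true := by
  rw [← PySem.Chars.exists_prefix_drop_iff_isIn]
  constructor
  · rintro ⟨i, _, h⟩
    exact ⟨i, (PySem.Chars.startswith_iff _ _).mp h⟩
  · rintro ⟨j, hj⟩
    by_cases hlt : j < t.length
    · exact ⟨j, hlt, (PySem.Chars.startswith_iff _ _).mpr hj⟩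
    · exfalso
      rw [List.drop_eq_nil_of_le (by omega)] at hj
      exact hk (List.prefix_nil.mp hj)

lemma bPick_eq_ref (t : String) (m : PySem.Set String) (l : List (String × List String))
    (h : ∀ pr ∈ l, PySem.Set.contains m pr.1
          = pr.2.any (fun kw => PySem.Str.isIn (PySem.Str.lower kw) t)) :
    bPick m l = idLoopRef t l := by
  induction l with
  | nil => rfl
  | cons pr rest IH =>
      obtain ⟨d, kws⟩ := pr
      simp only [bPick, idLoopRef]
      rw [h (d, kws) (List.mem_cons_self ..)]
      rw [IH (fun q hq => h q (List.mem_cons_of_mem _ hq))]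

lemma contains_bCollect (text : String) (pr : String × List String) (hpr : pr ∈ pvDiseases) :
    PySem.Set.contains (bCollect (PySem.Str.lower text).toList) pr.1
      = pr.2.any (fun kw => PySem.Str.isIn (PySem.Str.lower kw) (PySem.Str.lower text)) := by
  have hnodup : (pvDiseases.map Prod.fst).Nodup := by decide
  have hne : ∀ q ∈ pvDiseases, ∀ kw ∈ q.2, (PySem.Str.lower kw).toList ≠ [] := by decide
  rw [Bool.eq_iff_iff, PySem.Set.contains_iff, mem_bCollect]
  simp only [List.any_eq_true]
  constructor
  · rintro ⟨q, hq, hx, kw, hkw, k, hk, hsw⟩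
    have : q = pr := List.inj_on_of_nodup_map hnodup hq hpr hx.symm
    subst this
    refine ⟨kw, hkw, ?_⟩
    rw [PySem.Str.isIn_iff_infix, ← PySem.Chars.isIn_iff_infix]
    exact (exists_startswith_iff_isIn _ _ (hne q hq kw hkw)).mp ⟨k, hk, hsw⟩
  · rintro ⟨kw, hkw, h⟩
    rw [PySem.Str.isIn_iff_infix, ← PySem.Chars.isIn_iff_infix] at h
    obtain ⟨k, hk, hsw⟩ := (exists_startswith_iff_isIn _ _ (hne pr hpr kw hkw)).mpr h
    exact ⟨pr, hpr, rfl, kw, hkw, k, hk, hsw⟩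

-- ===== VERDICT (by name: the statement is the Claim_ definition above) =====
theorem identify_disease_spec : Claim_equal_identify_disease := by
  intro text _
  unfold Spec_identify_disease identify_disease identify_disease_alt
  rw [idLoopA_eq_ref]
  exact (bPick_eq_ref (PySem.Str.lower text) _ pvDiseases
    (fun pr hpr => contains_bCollect text pr hpr)).symm
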